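-- pv_equiv track=rewrite | github.com/vedang-kamat/line-coding-schemes | Python/biphase_m.py | biphasem_encode
-- ===== SOURCE A (Python) =====
-- def biphasem_encode(bits):
--     """
--     Biphase-M encoding:
--     - Each bit has two half-bit slots
--     - Always transition at start of bit
--     - If bit is 1, additional transition in middle
--     """
--     encoded = []
--     prev = 0  # starting level (V)
--     for b in bits:
--         # transition at start
--         prev = 0 if prev == 1 else 1
--         encoded.append(prev)
--         # possible middle transition for 1
--         if b == 1:
--             prev = 0 if prev == 1 else 1
--         encoded.append(prev)
--     return encoded
-- ===== SOURCE B (Python) =====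
-- from itertools import accumulate
--
--
-- def biphasem_encode(bits):
--     """
--     Closed-form Biphase-M: the level in a half-bit slot equals the total
--     number of line transitions made up to the end of that slot, mod 2.
--     Up to half-slot (i, h) (bit i, half h in {0, 1}) the line has made
--     i + 1 start-of-bit transitions and ones[i + h] middle transitions,
--     where ones is the prefix table of the count of bits equal to 1.
--     """
--     ones = list(accumulate((1 if b == 1 else 0 for b in bits), initial=0))
--     return [(i + 1 + ones[i + h]) % 2 for i in range(len(bits)) for h in (0, 1)]
-- ===== Notes on version B (the rewrite author's own statement) =====
-- stated objective: alternative
-- what changed: Replaces A's stateful prev-toggle loop with a closed form: build the prefix table of one-counts once (itertools.accumulate), then each half-bit slot's level is (i + 1 + ones[i + h]) % 2 directly, with no carried signal state.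
import Mathlib
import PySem

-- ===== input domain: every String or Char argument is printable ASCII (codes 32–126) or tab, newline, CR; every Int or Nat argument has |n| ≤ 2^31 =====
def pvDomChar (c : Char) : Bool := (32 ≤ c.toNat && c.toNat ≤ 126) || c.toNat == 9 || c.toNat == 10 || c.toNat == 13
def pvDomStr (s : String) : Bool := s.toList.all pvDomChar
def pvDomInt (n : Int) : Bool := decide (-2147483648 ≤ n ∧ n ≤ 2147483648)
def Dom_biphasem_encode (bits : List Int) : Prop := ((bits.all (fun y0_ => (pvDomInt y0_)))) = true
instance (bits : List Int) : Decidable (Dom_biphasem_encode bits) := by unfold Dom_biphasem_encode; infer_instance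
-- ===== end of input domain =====

-- B replaces A's stateful prev-toggle loop by a closed form: a prefix table of
-- one-counts plus arithmetic per half-bit slot (objective: alternative, same cost).

-- ===== PORT A =====
-- literal port of A's loop: state = (encoded, prev)
def biphasem_encode (bits : List Int) : List Int :=
  (bits.foldl (fun (st : List Int × Int) b =>
      let prev1 : Int := if st.2 = 1 then 0 else 1
      let enc1 := st.1 ++ [prev1]
      let prev2 : Int := if b = 1 then (if prev1 = 1 then 0 else 1) else prev1
      (enc1 ++ [prev2], prev2)) ([], 0)).1

-- ===== PORT B =====
-- literal port of B: prefix table of one-counts (accumulate with initial=0),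
-- then a closed-form comprehension over (i, h); ones[i+h] is always in range,
-- so the list indexing is ported as getD.
def biphasem_encode_alt (bits : List Int) : List Int :=
  let ones : List Int := (bits.map (fun b => if b = 1 then (1:Int) else 0)).scanl (· + ·) 0
  (List.range bits.length).flatMap (fun (i : Nat) =>
    [0, 1].map (fun (h : Nat) => PySem.Int.mod ((i : Int) + 1 + ones.getD (i + h) 0) 2))

-- ===== PRECONDITION & SPEC =====
def Spec_biphasem_encode (bits : List Int) (out : List Int) : Prop := out = biphasem_encode_alt bits
instance (bits : List Int) (out : List Int) : Decidable (Spec_biphasem_encode bits out) := by unfold Spec_biphasem_encode; infer_instance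

-- ===== CLAIM (what is proved, stated in full; the proofs are below) =====
def Claim_equal_biphasem_encode : Prop := ∀ (bits : List Int), Dom_biphasem_encode bits → Spec_biphasem_encode bits (biphasem_encode bits)

-- ===== LEMMAS AND PROOFS =====
-- common recursive specification: pvEnc p bits = the encoding when the line level is p
def pvEnc : Int → List Int → List Int
  | _, [] => []
  | p, b :: r =>
    let q : Int := if p = 1 then 0 else 1
    let s : Int := if b = 1 then (if q = 1 then 0 else 1) else q
    q :: s :: pvEnc s r

-- A's fold equals pvEnc
theorem pvA_enc (bits : List Int) : ∀ (acc : List Int) (p : Int), (p = 0 ∨ p = 1) →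
    (bits.foldl (fun (st : List Int × Int) b =>
      let prev1 : Int := if st.2 = 1 then 0 else 1
      let enc1 := st.1 ++ [prev1]
      let prev2 : Int := if b = 1 then (if prev1 = 1 then 0 else 1) else prev1
      (enc1 ++ [prev2], prev2)) (acc, p)).1 = acc ++ pvEnc p bits := by
  induction bits with
  | nil => intro acc p _; simp [pvEnc]
  | cons b rest ih =>
    intro acc p hp
    rcases hp with hp | hp <;> subst hp <;> by_cases hb : b = 1 <;>
      [(have H := ih (acc ++ [1, 0]) 0 (Or.inl rfl); rw [List.append_assoc] at H;
        simpa [pvEnc, hb] using H);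
       (have H := ih (acc ++ [1, 1]) 1 (Or.inr rfl); rw [List.append_assoc] at H;
        simpa [pvEnc, hb] using H);
       (have H := ih (acc ++ [0, 1]) 1 (Or.inr rfl); rw [List.append_assoc] at H;
        simpa [pvEnc, hb] using H);
       (have H := ih (acc ++ [0, 0]) 0 (Or.inl rfl); rw [List.append_assoc] at H;
        simpa [pvEnc, hb] using H)]

-- B-side: the prefix one-count table, read at index j
def pvOnes (bits : List Int) (j : Nat) : Int :=
  ((bits.map (fun b => if b = 1 then (1:Int) else 0)).scanl (· + ·) 0).getD j 0

theorem pv_scanl_add_shift (l : List Int) : ∀ (x : Int),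
    l.scanl (· + ·) x = (l.scanl (· + ·) 0).map (fun y => x + y) := by
  induction l with
  | nil => intro x; simp [List.scanl_nil]
  | cons a l ih =>
    intro x
    rw [List.scanl_cons, List.scanl_cons, ih (x + a), ih (0 + a)]
    simp only [List.map_cons, List.map_map, add_zero, List.cons.injEq, true_and]
    exact List.map_congr_left (fun y _ => by simp; ring)

theorem pvOnes_zero (bits : List Int) : pvOnes bits 0 = 0 := by
  cases bits <;> simp [pvOnes, List.scanl_nil, List.scanl_cons]

theorem pvOnes_succ (b : Int) (r : List Int) (j : Nat) (hj : j ≤ r.length) :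
    pvOnes (b :: r) (j + 1) = (if b = 1 then 1 else 0) + pvOnes r j := by
  have hlen : j < ((r.map (fun b => if b = 1 then (1:Int) else 0)).scanl (· + ·) 0).length := by
    simp [List.length_scanl]; omega
  simp only [pvOnes, List.map_cons, List.scanl_cons, List.getD_cons_succ]
  rw [pv_scanl_add_shift]
  rw [List.getD_eq_getElem _ _ (by simpa using hlen), List.getElem_map,
      List.getD_eq_getElem _ _ hlen]
  ring

theorem pvMod2 (t : Nat) : PySem.Int.mod (t : Int) 2 = ((t % 2 : Nat) : Int) := by
  have h2 : ((2:Int)) = ((2:Nat):Int) := by norm_num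
  rw [h2]; exact PySem.Int.mod_natCast t 2

-- B's comprehension, generalized over an already-consumed transition count t, equals pvEnc
theorem pvB_enc (bits : List Int) : ∀ (t : Nat),
    (List.range bits.length).flatMap (fun (i : Nat) =>
      [0, 1].map (fun (h : Nat) => PySem.Int.mod ((t : Int) + (i : Int) + 1 + pvOnes bits (i + h)) 2))
    = pvEnc (PySem.Int.mod (t : Int) 2) bits := by
  induction bits with
  | nil => intro t; simp [pvEnc]
  | cons b r ih =>
    intro t
    have hsplit : (List.range (b :: r).length).flatMap (fun (i : Nat) =>
        [0, 1].map (fun (h : Nat) => PySem.Int.mod ((t : Int) + (i : Int) + 1 + pvOnes (b :: r) (i + h)) 2))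
      = [0, 1].map (fun (h : Nat) => PySem.Int.mod ((t : Int) + 1 + pvOnes (b :: r) h) 2)
        ++ (List.range r.length).flatMap (fun (i : Nat) =>
          [0, 1].map (fun (h : Nat) => PySem.Int.mod ((t : Int) + ((i : Int) + 1) + 1 + pvOnes (b :: r) (i + 1 + h)) 2)) := by
      rw [List.length_cons, List.range_succ_eq_map, List.flatMap_cons, List.flatMap_map]
      simp
    rw [hsplit]
    have hc : ∀ i ∈ List.range r.length,
        [0, 1].map (fun (h : Nat) => PySem.Int.mod ((t : Int) + ((i : Int) + 1) + 1 + pvOnes (b :: r) (i + 1 + h)) 2)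
        = [0, 1].map (fun (h : Nat) => PySem.Int.mod (((t + 1 + (if b = 1 then 1 else 0) : Nat) : Int) + (i : Int) + 1 + pvOnes r (i + h)) 2) := by
      intro i hi
      have hi' : i < r.length := List.mem_range.mp hi
      have h0 : (i + 1 + 0) = (i + 0) + 1 := by omega
      have h1 : (i + 1 + 1) = (i + 1) + 1 := by omega
      simp only [List.map_cons, List.map_nil, h0, h1,
        pvOnes_succ b r (i + 0) (by omega), pvOnes_succ b r (i + 1) (by omega),
        List.cons.injEq, and_true]
      constructor <;> (congr 1 ; by_cases hb : b = 1 <;> simp only [hb, if_true, if_false] <;> push_cast <;> ring)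
    rw [List.flatMap_congr hc, ih (t + 1 + (if b = 1 then 1 else 0))]
    have k0 : PySem.Int.mod ((t : Int) + 1) 2 = (((t + 1) % 2 : Nat) : Int) := by
      rw [show ((t : Int) + 1) = (((t + 1 : Nat)) : Int) by push_cast; ring]; exact pvMod2 _
    have k1 : PySem.Int.mod ((t : Int) + 1 + 1) 2 = (((t + 1 + 1) % 2 : Nat) : Int) := by
      rw [show ((t : Int) + 1 + 1) = (((t + 1 + 1 : Nat)) : Int) by push_cast; ring]; exact pvMod2 _
    rcases Nat.mod_two_eq_zero_or_one t with hp | hp <;> by_cases hb : b = 1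
    · subst hb
      have h1 : (t + 1) % 2 = 1 := by omega
      have h2 : (t + 1 + 1) % 2 = 0 := by omega
      have e0 : pvOnes ((1:Int) :: r) 0 = 0 := pvOnes_zero _
      have e1 : pvOnes ((1:Int) :: r) 1 = 1 := by
        simpa [pvOnes_zero] using pvOnes_succ 1 r 0 (Nat.zero_le _)
      simp only [List.map_cons, List.map_nil, e0, e1, add_zero, k0, k1, pvMod2, hp, h1, h2,
        Nat.cast_zero, Nat.cast_one, List.cons_append, List.nil_append]
      simp [pvEnc]
      have hm : ((t : Int) + 1 + 1) % 2 = 0 := by omega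
      rw [hm]
    · have h1 : (t + 1) % 2 = 1 := by omega
      have e0 : pvOnes (b :: r) 0 = 0 := pvOnes_zero _
      have e1 : pvOnes (b :: r) 1 = 0 := by
        simpa [hb, pvOnes_zero] using pvOnes_succ b r 0 (Nat.zero_le _)
      have ht' : (t + 1 + if b = 1 then 1 else 0) = t + 1 := by simp [hb]
      simp only [List.map_cons, List.map_nil, e0, e1, add_zero, ht', k0, pvMod2, hp, h1,
        Nat.cast_zero, Nat.cast_one, List.cons_append, List.nil_append]
      simp [pvEnc, hb]
    · subst hb
      have h1 : (t + 1) % 2 = 0 := by omega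
      have h2 : (t + 1 + 1) % 2 = 1 := by omega
      have e0 : pvOnes ((1:Int) :: r) 0 = 0 := pvOnes_zero _
      have e1 : pvOnes ((1:Int) :: r) 1 = 1 := by
        simpa [pvOnes_zero] using pvOnes_succ 1 r 0 (Nat.zero_le _)
      simp only [List.map_cons, List.map_nil, e0, e1, add_zero, k0, k1, pvMod2, hp, h1, h2,
        Nat.cast_zero, Nat.cast_one, List.cons_append, List.nil_append]
      simp [pvEnc]
      have hm : ((t : Int) + 1 + 1) % 2 = 1 := by omega
      rw [hm]
    · have h1 : (t + 1) % 2 = 0 := by omega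
      have e0 : pvOnes (b :: r) 0 = 0 := pvOnes_zero _
      have e1 : pvOnes (b :: r) 1 = 0 := by
        simpa [hb, pvOnes_zero] using pvOnes_succ b r 0 (Nat.zero_le _)
      have ht' : (t + 1 + if b = 1 then 1 else 0) = t + 1 := by simp [hb]
      simp only [List.map_cons, List.map_nil, e0, e1, add_zero, ht', k0, pvMod2, hp, h1,
        Nat.cast_zero, Nat.cast_one, List.cons_append, List.nil_append]
      simp [pvEnc, hb]

-- ===== VERDICT (by name: the statement is the Claim_ definition above) =====
theorem biphasem_encode_spec : Claim_equal_biphasem_encode := by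
  intro bits _
  unfold Spec_biphasem_encode biphasem_encode biphasem_encode_alt
  rw [pvA_enc bits [] 0 (Or.inl rfl)]
  have := pvB_enc bits 0
  simp only [Nat.cast_zero, zero_add, pvOnes] at this
  exact this.symm
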